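-- pv_equiv track=rewrite | github.com/migueleps/metro-anomaly-ECML2023 | failure_detection.py | detect_failures
-- ===== SOURCE A (Python) =====
-- def detect_failures(anom_indices):
--     failure_list = []
--     failure = set()
--     for i in range(len(anom_indices) - 1):
--         if anom_indices[i] == 1 and anom_indices[i + 1] == 1:
--             failure.add(i)
--             failure.add(i + 1)
--         elif len(failure) > 0:
--             failure_list.append(failure)
--             failure = set()
--
--     if len(failure) > 0:
--         failure_list.append(failure)
--
--     return failure_list
-- ===== SOURCE B (Python) =====
-- def detect_failures(anom_indices):
--     failure_list = []
--     run_start = None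
--     for i, v in enumerate(anom_indices):
--         if v == 1:
--             if run_start is None:
--                 run_start = i
--         else:
--             if run_start is not None and i - run_start >= 2:
--                 failure_list.append(set(range(run_start, i)))
--             run_start = None
--     n = len(anom_indices)
--     if run_start is not None and n - run_start >= 2:
--         failure_list.append(set(range(run_start, n)))
--     return failure_list
-- ===== Notes on version B (the rewrite author's own statement) =====
-- stated objective: idiomatic
-- what changed: B replaces A's adjacent-pair test with flush-on-non-pair (and its incrementally grown set) by direct maximal-run detection: it tracks the start index of the current run of 1s and, when the run ends, emits set(range(start, end)) only if the run length is at least 2.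
import Mathlib
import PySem

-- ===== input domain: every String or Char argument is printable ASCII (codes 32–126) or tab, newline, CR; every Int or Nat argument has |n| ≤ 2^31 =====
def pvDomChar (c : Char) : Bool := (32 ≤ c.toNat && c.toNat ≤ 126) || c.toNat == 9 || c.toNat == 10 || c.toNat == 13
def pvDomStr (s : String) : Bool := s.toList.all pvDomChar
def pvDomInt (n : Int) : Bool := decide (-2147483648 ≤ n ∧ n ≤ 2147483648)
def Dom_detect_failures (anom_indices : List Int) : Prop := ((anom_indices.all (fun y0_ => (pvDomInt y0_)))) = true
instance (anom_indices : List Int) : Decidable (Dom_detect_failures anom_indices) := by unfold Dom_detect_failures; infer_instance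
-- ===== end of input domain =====

-- B detects maximal runs of 1s directly (run-start tracking) instead of A's adjacent-pair
-- test with flush-on-failure; same return value, different decomposition (idiomatic rewrite).

-- ===== PORT A =====
-- loop body of A: 'if anom_indices[i]==1 and anom_indices[i+1]==1: failure.add(i); failure.add(i+1)
--                  elif len(failure) > 0: failure_list.append(failure); failure = set()'
def stepA (anom_indices : List Int) (st : List (List Int) × PySem.Set Int) (i : Int) :
    List (List Int) × PySem.Set Int :=
  -- indices i and i+1 are always in range (i ∈ range(len-1)), so pyGetD is exact here
  if PySem.List.pyGetD anom_indices i 0 = 1 ∧ PySem.List.pyGetD anom_indices (i + 1) 0 = 1 then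
    (st.1, PySem.Set.add (PySem.Set.add st.2 i) (i + 1))
  else if 0 < st.2.length then
    (st.1 ++ [st.2], PySem.Set.ofList [])
  else st

-- final 'if len(failure) > 0: failure_list.append(failure)'
def finA (st : List (List Int) × PySem.Set Int) : List (List Int) :=
  if 0 < st.2.length then st.1 ++ [st.2] else st.1

def detect_failures (anom_indices : List Int) : List (List Int) :=
  finA ((PySem.List.pyRange 0 ((anom_indices.length : Int) - 1) 1).foldl
          (stepA anom_indices) ([], PySem.Set.ofList []))

-- ===== PORT B =====
-- B's loop over enumerate(anom_indices): state = (failure_list, run_start)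
def altLoop : List Int → Int → List (List Int) × Option Int → List (List Int) × Option Int
  | [], _, st => st
  | v :: rest, i, st =>
    if v = 1 then
      altLoop rest (i + 1) (st.1, match st.2 with | none => some i | some s => some s)
    else
      altLoop rest (i + 1)
        ((match st.2 with
          | some s => if 2 ≤ i - s then st.1 ++ [PySem.Set.ofList (PySem.List.pyRange s i 1)] else st.1
          | none => st.1), none)

-- B's final 'if run_start is not None and n - run_start >= 2: append set(range(run_start, n))'
def finB (n : Int) (st : List (List Int) × Option Int) : List (List Int) :=
  match st.2 with
  | some s => if 2 ≤ n - s then st.1 ++ [PySem.Set.ofList (PySem.List.pyRange s n 1)] else st.1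
  | none => st.1

def detect_failures_alt (anom_indices : List Int) : List (List Int) :=
  finB (anom_indices.length : Int) (altLoop anom_indices 0 ([], none))

-- ===== PRECONDITION & SPEC =====
def Spec_detect_failures (anom_indices : List Int) (out : List (List Int)) : Prop := out = detect_failures_alt anom_indices
instance (anom_indices : List Int) (out : List (List Int)) : Decidable (Spec_detect_failures anom_indices out) := by unfold Spec_detect_failures; infer_instance

-- ===== CLAIM (what is proved, stated in full; the proofs are below) =====
def Claim_equal_detect_failures : Prop := ∀ (anom_indices : List Int), Dom_detect_failures anom_indices → Spec_detect_failures anom_indices (detect_failures anom_indices)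

-- ===== LEMMAS AND PROOFS =====

-- A's loop, recast as structural recursion over the suffix of the list (proved equal below)
def aGo : List Int → Int → List (List Int) → PySem.Set Int → List (List Int)
  | [], _, fl, f => if 0 < f.length then fl ++ [f] else fl
  | [_], _, fl, f => if 0 < f.length then fl ++ [f] else fl
  | v :: w :: rest, i, fl, f =>
    if v = 1 ∧ w = 1 then aGo (w :: rest) (i + 1) fl (PySem.Set.add (PySem.Set.add f i) (i + 1))
    else if 0 < f.length then aGo (w :: rest) (i + 1) (fl ++ [f]) (PySem.Set.ofList [])
    else aGo (w :: rest) (i + 1) fl f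

lemma pyRange_nil {a b : Int} (h : b ≤ a) : PySem.List.pyRange a b 1 = [] := by
  apply List.eq_nil_iff_forall_not_mem.mpr
  intro x hx
  have := PySem.List.mem_pyRange_one.mp hx
  omega

lemma pyRange_nodup (a b : Int) : (PySem.List.pyRange a b 1).Nodup := by
  suffices H : ∀ (n : Nat) (a b : Int), (b - a).toNat ≤ n → (PySem.List.pyRange a b 1).Nodup by
    exact H (b - a).toNat a b le_rfl
  intro n
  induction n with
  | zero =>
    intro a b h
    have : b ≤ a := by omega
    simp [pyRange_nil this]
  | succ n ih =>
    intro a b h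
    by_cases hab : b ≤ a
    · simp [pyRange_nil hab]
    · have hab' : a < b := by omega
      rw [PySem.List.pyRange_one_cons hab']
      refine List.nodup_cons.mpr ⟨?_, ih (a + 1) b (by omega)⟩
      intro hm
      have := PySem.List.mem_pyRange_one.mp hm
      omega

lemma ofList_pyRange (a b : Int) :
    PySem.Set.ofList (PySem.List.pyRange a b 1) = PySem.List.pyRange a b 1 :=
  PySem.Set.ofList_eq_self_of_nodup _ (pyRange_nodup a b)

-- appending the next index to the current run set
lemma add_last (s i : Int) (h : s ≤ i) :
    PySem.Set.add (PySem.List.pyRange s i 1) i = PySem.List.pyRange s (i + 1) 1 := by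
  have hni : i ∉ PySem.List.pyRange s i 1 := by
    intro hm; have := PySem.List.mem_pyRange_one.mp hm; omega
  have h2 : PySem.Set.add (PySem.List.pyRange s i 1) i = PySem.List.pyRange s i 1 ++ [i] := by
    simp [PySem.Set.add, PySem.Set.contains, hni]
  rw [h2, PySem.List.pyRange_one_succ_right h]

-- growing the current failure set by the next confirmed pair
lemma add_pair (s i : Int) (h : s ≤ i) :
    PySem.Set.add (PySem.Set.add (PySem.List.pyRange s (i + 1) 1) i) (i + 1)
      = PySem.List.pyRange s (i + 1 + 1) 1 := by
  have hi : i ∈ PySem.List.pyRange s (i + 1) 1 := PySem.List.mem_pyRange_one.mpr (by omega)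
  have h1 : PySem.Set.add (PySem.List.pyRange s (i + 1) 1) i = PySem.List.pyRange s (i + 1) 1 := by
    simp [PySem.Set.add, PySem.Set.contains, hi]
  rw [h1, add_last s (i + 1) (by omega)]

-- starting a fresh pair run from the empty set
lemma add_pair0 (i : Int) :
    PySem.Set.add (PySem.Set.add (PySem.Set.ofList ([] : List Int)) i) (i + 1)
      = PySem.List.pyRange i (i + 1 + 1) 1 := by
  have h0 : PySem.Set.ofList ([] : List Int) = PySem.List.pyRange i i 1 := by
    rw [pyRange_nil (le_refl i)]; rfl
  rw [h0, add_last i i (le_refl i), add_last i (i + 1) (by omega)]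

lemma pyRange_len_pos {s i : Int} (h : s ≤ i) : 0 < (PySem.List.pyRange s (i + 1) 1).length := by
  rw [PySem.List.pyRange_one_cons (by omega)]
  simp

lemma ofList_nil_len : (PySem.Set.ofList ([] : List Int)).length = 0 := rfl

-- the mutual invariant: A's pair-scan equals B's run-scan, in both reachable states
lemma NP (ys : List Int) :
    (∀ (i : Int) (fl : List (List Int)),
        aGo ys i fl (PySem.Set.ofList []) = finB (i + ys.length) (altLoop ys i (fl, none)))
    ∧ (∀ (v : Int) (rest : List Int) (i s : Int) (fl : List (List Int)),
        ys = v :: rest → v = 1 → s + 1 ≤ i →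
        aGo ys i fl (PySem.List.pyRange s (i + 1) 1)
          = finB (i + ys.length) (altLoop ys i (fl, some s))) := by
  induction ys with
  | nil =>
    refine ⟨?_, ?_⟩
    · intro i fl; simp [aGo, altLoop, finB]
    · intro v rest i s fl h; exact absurd h (by simp)
  | cons v rest ih =>
    obtain ⟨ihN, ihP⟩ := ih
    have hlen : ∀ (i : Int), i + ((v :: rest).length : Int) = (i + 1) + (rest.length : Int) := by
      intro i; push_cast [List.length_cons]; ring
    have h0len : ¬ 0 < (PySem.Set.ofList ([] : List Int)).length := by
      rw [ofList_nil_len]; omega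
    refine ⟨?_, ?_⟩
    · -- N case
      intro i fl
      match rest with
      | [] =>
        by_cases hv : v = 1
        · simp [aGo, altLoop, finB, hv]
        · simp [aGo, altLoop, finB, hv]
      | w :: rest' =>
        by_cases hv : v = 1
        · by_cases hw : w = 1
          · -- start a new run at i
            rw [aGo, if_pos (⟨hv, hw⟩ : v = 1 ∧ w = 1), add_pair0,
                ihP w rest' (i + 1) i fl rfl hw (by omega), hlen]
            conv_rhs => rw [altLoop]
            rw [if_pos hv]
          · -- isolated 1: both sides discard it
            rw [aGo, if_neg (fun h => hw h.2), if_neg h0len, ihN (i + 1) fl, hlen]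
            conv_rhs => rw [altLoop]
            rw [if_pos hv]
            simp [altLoop, hw]
        · rw [aGo, if_neg (fun h => hv h.1), if_neg h0len, ihN (i + 1) fl, hlen]
          conv_rhs => rw [altLoop]
          rw [if_neg hv]
    · -- P case
      intro v' rest' i s fl heq hv hs
      injection heq with h1 h2
      subst h1; subst h2
      have hsi : s ≤ i := by omega
      have hpos := pyRange_len_pos hsi
      match rest with
      | [] =>
        have h2 : 2 ≤ (i + 1) - s := by omega
        rw [aGo, if_pos hpos]
        conv_rhs => rw [altLoop]
        rw [if_pos hv]
        conv_rhs => rw [altLoop]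
        show _ = finB (i + ((1 : Nat) : Int)) (fl, some s)
        rw [show (i + ((1 : Nat) : Int)) = i + 1 by push_cast; ring]
        simp [finB, ofList_pyRange, show (2 : Int) ≤ i + 1 - s by omega]
      | w :: rest'' =>
        by_cases hw : w = 1
        · rw [aGo, if_pos (⟨hv, hw⟩ : v = 1 ∧ w = 1), add_pair s i hsi,
              ihP w rest'' (i + 1) s fl rfl hw (by omega), hlen]
          conv_rhs => rw [altLoop]
          rw [if_pos hv]
        · -- run ends at w: A flushes the set, B emits range(s, i+1)
          rw [aGo, if_neg (fun h => hw h.2), if_pos hpos,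
              ihN (i + 1) (fl ++ [PySem.List.pyRange s (i + 1) 1]), hlen]
          have h2 : 2 ≤ (i + 1) - s := by omega
          conv_rhs => rw [altLoop]
          rw [if_pos hv]
          simp [altLoop, hw, h2, ofList_pyRange]

-- A's index fold over range(len-1) equals the structural pair-scan aGo on the suffix
lemma fold_eq_aGo (xs : List Int) (m : Nat) :
    ∀ (k : Nat), xs.length - k ≤ m → ∀ (fl : List (List Int)) (f : PySem.Set Int),
      finA ((PySem.List.pyRange (k : Int) ((xs.length : Int) - 1) 1).foldl (stepA xs) (fl, f))
        = aGo (xs.drop k) (k : Int) fl f := by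
  induction m with
  | zero =>
    intro k hk fl f
    have hlen : xs.length ≤ k := by omega
    rw [pyRange_nil (show ((xs.length : Int) - 1) ≤ ((k : Nat) : Int) by omega),
        List.drop_eq_nil_of_le hlen]
    simp [aGo, finA, List.foldl]
  | succ m ih =>
    intro k hk fl f
    by_cases hsmall : xs.length ≤ k + 1
    · rw [pyRange_nil (show ((xs.length : Int) - 1) ≤ ((k : Nat) : Int) by omega)]
      rcases Nat.lt_or_ge k xs.length with hlt | hge
      · have hdrop : xs.drop k = [xs[k]] := by
          rw [List.drop_eq_getElem_cons hlt, List.drop_eq_nil_of_le (by omega)]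
        rw [hdrop]
        simp [aGo, finA, List.foldl]
      · rw [List.drop_eq_nil_of_le hge]
        simp [aGo, finA, List.foldl]
    · have hk2 : k + 2 ≤ xs.length := by omega
      have hcons : PySem.List.pyRange (k : Int) ((xs.length : Int) - 1) 1
          = (k : Int) :: PySem.List.pyRange ((k : Int) + 1) ((xs.length : Int) - 1) 1 :=
        PySem.List.pyRange_one_cons (by omega)
      have hcast : ((k : Int) + 1) = ((k + 1 : Nat) : Int) := by push_cast; ring
      have hg1 : PySem.List.pyGetD xs (k : Int) 0 = xs[k]'(by omega) := by
        rw [PySem.List.pyGetD_natCast, List.getD_eq_getElem _ _ (by omega)]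
      have hg2 : PySem.List.pyGetD xs ((k : Int) + 1) 0 = xs[k + 1]'(by omega) := by
        rw [hcast, PySem.List.pyGetD_natCast, List.getD_eq_getElem _ _ (by omega)]
      have hdrop1 : xs.drop k = xs[k]'(by omega) :: xs.drop (k + 1) :=
        List.drop_eq_getElem_cons (by omega)
      have hdrop2 : xs.drop (k + 1) = xs[k + 1]'(by omega) :: xs.drop (k + 2) :=
        List.drop_eq_getElem_cons (by omega)
      rw [hcons, List.foldl_cons, hdrop1, hdrop2]
      by_cases hc : xs[k]'(by omega) = 1 ∧ xs[k + 1]'(by omega) = 1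
      · have hstepA : stepA xs (fl, f) (k : Int)
            = (fl, PySem.Set.add (PySem.Set.add f (k : Int)) ((k : Int) + 1)) := by
          unfold stepA; rw [hg1, hg2, if_pos hc]
        have hgo : aGo (xs[k]'(by omega) :: xs[k + 1]'(by omega) :: xs.drop (k + 2)) (k : Int) fl f
            = aGo (xs[k + 1]'(by omega) :: xs.drop (k + 2)) ((k : Int) + 1) fl
                (PySem.Set.add (PySem.Set.add f (k : Int)) ((k : Int) + 1)) := by
          rw [aGo, if_pos hc]
        rw [hstepA, hgo, hcast]
        have := ih (k + 1) (by omega) fl (PySem.Set.add (PySem.Set.add f (k : Int)) ((k : Int) + 1))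
        rw [hdrop2] at this
        exact this
      · by_cases hf : 0 < f.length
        · have hstepA : stepA xs (fl, f) (k : Int) = (fl ++ [f], PySem.Set.ofList []) := by
            unfold stepA; rw [hg1, hg2, if_neg hc, if_pos hf]
          have hgo : aGo (xs[k]'(by omega) :: xs[k + 1]'(by omega) :: xs.drop (k + 2)) (k : Int) fl f
              = aGo (xs[k + 1]'(by omega) :: xs.drop (k + 2)) ((k : Int) + 1) (fl ++ [f])
                  (PySem.Set.ofList []) := by
            rw [aGo, if_neg hc, if_pos hf]
          rw [hstepA, hgo, hcast]
          have := ih (k + 1) (by omega) (fl ++ [f]) (PySem.Set.ofList [])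
          rw [hdrop2] at this
          exact this
        · have hstepA : stepA xs (fl, f) (k : Int) = (fl, f) := by
            unfold stepA; rw [hg1, hg2, if_neg hc, if_neg hf]
          have hgo : aGo (xs[k]'(by omega) :: xs[k + 1]'(by omega) :: xs.drop (k + 2)) (k : Int) fl f
              = aGo (xs[k + 1]'(by omega) :: xs.drop (k + 2)) ((k : Int) + 1) fl f := by
            rw [aGo, if_neg hc, if_neg hf]
          rw [hstepA, hgo, hcast]
          have := ih (k + 1) (by omega) fl f
          rw [hdrop2] at this
          exact this

-- ===== VERDICT (by name: the statement is the Claim_ definition above) =====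
theorem detect_failures_spec : Claim_equal_detect_failures := by
  intro xs _
  show detect_failures xs = detect_failures_alt xs
  unfold detect_failures detect_failures_alt
  have h0 : (0 : Int) = ((0 : Nat) : Int) := by norm_num
  rw [h0, fold_eq_aGo xs xs.length 0 (by omega) [] (PySem.Set.ofList []), List.drop_zero]
  rw [(NP xs).1 ((0 : Nat) : Int) []]
  norm_num
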